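-- pv_equiv track=rewrite | github.com/kilolonion/excelmanus | excelmanus/providers/stream_types.py | _find_best_partial_open_suffix
-- ===== SOURCE A (Python) =====
-- _THINK_TAG_PAIRS: list[tuple[str, str]] = [
--     ("<think>", "</think>"),
--     ("<thinking>", "</thinking>"),
-- ]
--
-- def _find_best_partial_open_suffix(buf: str) -> int:
--     """检查 buf 尾部是否是任意支持的开标签的前缀，返回最长匹配长度。"""
--     best = 0
--     for open_tag, _ in _THINK_TAG_PAIRS:
--         max_check = min(len(open_tag) - 1, len(buf))
--         for length in range(max_check, 0, -1):
--             if open_tag.startswith(buf[-length:]):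
--                 best = max(best, length)
--                 break
--     return best
-- ===== SOURCE B (Python) =====
-- _THINK_TAG_PAIRS: list[tuple[str, str]] = [
--     ("<think>", "</think>"),
--     ("<thinking>", "</thinking>"),
-- ]
--
-- _OPEN_TAG_PREFIXES = {
--     tag[:i] for tag, _ in _THINK_TAG_PAIRS for i in range(1, len(tag))
-- }
-- _MAX_PARTIAL = max(len(tag) for tag, _ in _THINK_TAG_PAIRS) - 1
--
--
-- def _find_best_partial_open_suffix(buf: str) -> int:
--     """Longest buf-suffix that is a proper prefix of any supported open tag."""
--     for length in range(min(_MAX_PARTIAL, len(buf)), 0, -1):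
--         if buf[len(buf) - length:] in _OPEN_TAG_PREFIXES:
--             return length
--     return 0
-- ===== Notes on version B (the rewrite author's own statement) =====
-- stated objective: idiomatic
-- what changed: Replaces A's per-tag nested descending scans (startswith against each open tag, max over tags) by a module-level precomputed set of all proper open-tag prefixes and a single descending length scan that returns the first suffix found in the set.
import Mathlib
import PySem

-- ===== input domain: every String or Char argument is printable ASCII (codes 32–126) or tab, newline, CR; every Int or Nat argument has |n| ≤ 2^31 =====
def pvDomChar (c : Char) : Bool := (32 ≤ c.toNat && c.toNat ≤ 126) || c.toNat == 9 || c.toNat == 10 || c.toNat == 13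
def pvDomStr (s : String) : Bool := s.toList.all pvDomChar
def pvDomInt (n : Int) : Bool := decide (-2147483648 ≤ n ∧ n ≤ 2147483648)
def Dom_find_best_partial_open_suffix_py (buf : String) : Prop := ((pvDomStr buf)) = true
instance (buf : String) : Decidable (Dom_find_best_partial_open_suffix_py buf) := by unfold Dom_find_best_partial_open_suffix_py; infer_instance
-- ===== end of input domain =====

-- B replaces A's per-tag nested descending scans by a precomputed set of all proper open-tag
-- prefixes plus ONE descending length scan (idiomatic build-an-index-then-scan structure).

-- ===== PORT A =====
def pvThinkTagPairs : List (String × String) :=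
  [("<think>", "</think>"), ("<thinking>", "</thinking>")]

-- inner 'for length in range(max_check, 0, -1): … break' loop of A (break = stop at match)
def pvInnerA (openTag buf : String) (best : Int) : Nat → Int
  | 0 => best
  | Nat.succ k =>
      if PySem.Str.startswith openTag (PySem.Str.slice buf (some (-((k + 1 : Nat) : Int))) none)
      then max best ((k + 1 : Nat) : Int)
      else pvInnerA openTag buf best k

def find_best_partial_open_suffix_py (buf : String) : Int :=
  pvThinkTagPairs.foldl (fun best p =>
    pvInnerA p.1 buf best
      (min ((PySem.Str.len p.1 : Int) - 1) (PySem.Str.len buf : Int)).toNat) 0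

-- ===== PORT B =====
-- {tag[:i] for tag, _ in _THINK_TAG_PAIRS for i in range(1, len(tag))}
def pvOpenTagPrefixes : PySem.Set String :=
  PySem.Set.ofList (pvThinkTagPairs.flatMap (fun p =>
    (PySem.List.pyRange 1 (PySem.Str.len p.1) 1).map (fun i => PySem.Str.slice p.1 none (some i))))

-- max(len(tag) for tag, _ in _THINK_TAG_PAIRS) - 1; the literal pair list is nonempty, so
-- Python's max returns a value (the .getD 0 arm is unreachable)
def pvMaxPartial : Int :=
  (PySem.List.max? (pvThinkTagPairs.map (fun p => (PySem.Str.len p.1 : Int))) (fun x => x)).getD 0 - 1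

-- 'for length in range(min(_MAX_PARTIAL, len(buf)), 0, -1): … return length' loop of B
def pvScanB (buf : String) : Nat → Int
  | 0 => 0
  | Nat.succ k =>
      if PySem.Set.contains pvOpenTagPrefixes
           (PySem.Str.slice buf (some ((PySem.Str.len buf : Int) - ((k + 1 : Nat) : Int))) none)
      then ((k + 1 : Nat) : Int)
      else pvScanB buf k

def find_best_partial_open_suffix_py_alt (buf : String) : Int :=
  pvScanB buf (min pvMaxPartial (PySem.Str.len buf : Int)).toNat

-- ===== PRECONDITION & SPEC =====
def Spec_find_best_partial_open_suffix_py (buf : String) (out : Int) : Prop := out = find_best_partial_open_suffix_py_alt buf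
instance (buf : String) (out : Int) : Decidable (Spec_find_best_partial_open_suffix_py buf out) := by unfold Spec_find_best_partial_open_suffix_py; infer_instance

-- ===== CLAIM (what is proved, stated in full; the proofs are below) =====
def Claim_equal_find_best_partial_open_suffix_py : Prop := ∀ (buf : String), Dom_find_best_partial_open_suffix_py buf → Spec_find_best_partial_open_suffix_py buf (find_best_partial_open_suffix_py buf)

-- ===== LEMMAS AND PROOFS =====

-- generic descending 'first match' scan: first l in [m..1] with p l, else 0
def pvDF (p : Nat → Bool) : Nat → Int
  | 0 => 0
  | Nat.succ k => if p (k + 1) then ((k + 1 : Nat) : Int) else pvDF p k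

theorem pvDF_nonneg (p : Nat → Bool) (m : Nat) : 0 ≤ pvDF p m := by
  induction m with
  | zero => simp [pvDF]
  | succ k ih => simp only [pvDF]; split <;> [positivity; exact ih]

theorem pvDF_le (p : Nat → Bool) (m : Nat) : pvDF p m ≤ (m : Int) := by
  induction m with
  | zero => simp [pvDF]
  | succ k ih => simp only [pvDF]; split <;> omega

theorem pvDF_congr (p q : Nat → Bool) (m : Nat)
    (h : ∀ l, 1 ≤ l → l ≤ m → p l = q l) : pvDF p m = pvDF q m := by
  induction m with
  | zero => rfl
  | succ k ih =>
      simp only [pvDF, h (k + 1) (by omega) (by omega)]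
      split
      · rfl
      · exact ih (fun l h1 h2 => h l h1 (by omega))

theorem pvDF_mono (p : Nat → Bool) (m m' : Nat) (h : m ≤ m') : pvDF p m ≤ pvDF p m' := by
  induction m' with
  | zero =>
      have hm : m = 0 := by omega
      subst hm; exact le_refl _
  | succ k ih =>
      by_cases hm : m = k + 1
      · subst hm; exact le_refl _
      · have h2 : m ≤ k := by omega
        simp only [pvDF]
        split
        · have := pvDF_le p m; omega
        · exact ih h2

theorem pvInnerA_eq (openTag buf : String) (m : Nat) (best : Int) (hb : 0 ≤ best) :
    pvInnerA openTag buf best m =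
      max best (pvDF (fun l =>
        PySem.Str.startswith openTag (PySem.Str.slice buf (some (-(l : Int))) none)) m) := by
  induction m with
  | zero => simp only [pvInnerA, pvDF]; omega
  | succ k ih =>
      simp only [pvInnerA, pvDF]
      split
      · rfl
      · exact ih

theorem pvScanB_eq (buf : String) (m : Nat) :
    pvScanB buf m =
      pvDF (fun l => PySem.Set.contains pvOpenTagPrefixes
        (PySem.Str.slice buf (some ((PySem.Str.len buf : Int) - (l : Int))) none)) m := by
  induction m with
  | zero => rfl
  | succ k ih => simp only [pvScanB, pvDF]; split <;> [rfl; exact ih]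

theorem pvLen_eq (buf : String) : PySem.Str.len buf = buf.toList.length := by
  simp [PySem.Str.len_eq]

theorem pvSliceNeg (buf : String) (l : Nat) (h1 : 0 < l) :
    (PySem.Str.slice buf (some (-(l : Int))) none).toList
      = buf.toList.drop (buf.toList.length - l) := by
  simp [PySem.Str.toList_slice, PySem.Chars.slice_eq_listSlice]
  rw [PySem.List.slice_from_neg_natCast _ _ h1]
  simp

theorem pvSlicePos (buf : String) (l : Nat) (hn : l ≤ buf.toList.length) :
    (PySem.Str.slice buf (some ((buf.toList.length : Int) - (l : Int))) none).toList
      = buf.toList.drop (buf.toList.length - l) := by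
  rw [show ((buf.toList.length : Int) - (l : Int)) = ((buf.toList.length - l : Nat) : Int) by omega]
  simp [PySem.Str.toList_slice, PySem.Chars.slice_eq_listSlice, PySem.List.slice_from_natCast]

theorem pvStrEqOfToList (a b : String) (h : a.toList = b.toList) : a = b := by
  rw [← String.ofList_toList (s := a), ← String.ofList_toList (s := b), h]

theorem pvPrefixesEval : pvOpenTagPrefixes =
    ["<", "<t", "<th", "<thi", "<thin", "<think", "<thinki", "<thinkin", "<thinking"] := by
  decide

theorem pvTakeAgree : ∀ l < 7, ("<think>".toList).take l = ("<thinking>".toList).take l := by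
  decide

theorem pvContainsIff (s : String) (h1 : 1 ≤ s.toList.length) (h9 : s.toList.length ≤ 9) :
    PySem.Set.contains pvOpenTagPrefixes s
      = PySem.Chars.startswith "<thinking>".toList s.toList := by
  rw [pvPrefixesEval, Bool.eq_iff_iff]
  rw [show (PySem.Set.contains
      (["<", "<t", "<th", "<thi", "<thin", "<think", "<thinki", "<thinkin", "<thinking"] : List String) s = true)
      ↔ s ∈ (["<", "<t", "<th", "<thi", "<thin", "<think", "<thinki", "<thinkin", "<thinking"] : List String)
    from by simp [PySem.Set.contains]]
  rw [PySem.Chars.startswith_iff]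
  constructor
  · intro hmem
    simp only [List.mem_cons, List.not_mem_nil, or_false] at hmem
    rcases hmem with rfl | rfl | rfl | rfl | rfl | rfl | rfl | rfl | rfl <;> decide
  · intro hp
    rw [List.prefix_iff_eq_take] at hp
    obtain ⟨l, hl⟩ : ∃ l, s.toList.length = l := ⟨_, rfl⟩
    rw [hl] at hp h1 h9
    have hs : s = String.ofList (("<thinking>".toList).take l) := by
      apply pvStrEqOfToList
      simpa using hp
    subst hs
    interval_cases l <;> decide

theorem find_best_partial_open_suffix_py_spec' (buf : String) :
    find_best_partial_open_suffix_py buf = find_best_partial_open_suffix_py_alt buf := by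
  have hsfxlen : ∀ l, 1 ≤ l → l ≤ buf.toList.length →
      (buf.toList.drop (buf.toList.length - l)).length = l := by
    intro l _ h2; rw [List.length_drop]; omega
  -- the common scan predicate: suffix of length l is a prefix of "<thinking>"
  have hA : find_best_partial_open_suffix_py buf =
      max (pvDF (fun l => PySem.Chars.startswith "<thinking>".toList
              (buf.toList.drop (buf.toList.length - l))) (min 6 buf.toList.length))
          (pvDF (fun l => PySem.Chars.startswith "<thinking>".toList
              (buf.toList.drop (buf.toList.length - l))) (min 9 buf.toList.length)) := by
    unfold find_best_partial_open_suffix_py pvThinkTagPairs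
    simp only [List.foldl_cons, List.foldl_nil]
    rw [pvLen_eq buf]
    rw [show (min ((PySem.Str.len "<think>" : Int) - 1) (buf.toList.length : Int)).toNat
        = min 6 buf.toList.length from by
      rw [show PySem.Str.len "<think>" = 7 from by decide]; omega]
    rw [show (min ((PySem.Str.len "<thinking>" : Int) - 1) (buf.toList.length : Int)).toNat
        = min 9 buf.toList.length from by
      rw [show PySem.Str.len "<thinking>" = 10 from by decide]; omega]
    rw [pvInnerA_eq _ _ _ _ (le_refl 0)]
    rw [pvInnerA_eq _ _ _ _ (le_max_left 0 _)]
    congr 1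
    · -- tag-1 scan equals the common predicate on [1 .. min 6 |buf|]
      rw [max_eq_right (pvDF_nonneg _ _)]
      apply pvDF_congr
      intro l hl1 hl2
      have hln : l ≤ buf.toList.length := by omega
      rw [show PySem.Str.startswith "<think>" (PySem.Str.slice buf (some (-(l : Int))) none)
          = PySem.Chars.startswith "<think>".toList
              (buf.toList.drop (buf.toList.length - l)) from by
        rw [← pvSliceNeg buf l (by omega)]; simp [PySem.Str.startswith_eq]]
      rw [Bool.eq_iff_iff, PySem.Chars.startswith_iff, PySem.Chars.startswith_iff]
      rw [List.prefix_iff_eq_take, List.prefix_iff_eq_take, hsfxlen l hl1 hln]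
      rw [pvTakeAgree l (by omega)]
    · -- tag-2 scan equals the common predicate on [1 .. min 9 |buf|]
      apply pvDF_congr
      intro l hl1 hl2
      have hln : l ≤ buf.toList.length := by omega
      rw [show PySem.Str.startswith "<thinking>" (PySem.Str.slice buf (some (-(l : Int))) none)
          = PySem.Chars.startswith "<thinking>".toList
              (buf.toList.drop (buf.toList.length - l)) from by
        rw [← pvSliceNeg buf l (by omega)]; simp [PySem.Str.startswith_eq]]
  have hB : find_best_partial_open_suffix_py_alt buf =
      pvDF (fun l => PySem.Chars.startswith "<thinking>".toList
          (buf.toList.drop (buf.toList.length - l))) (min 9 buf.toList.length) := by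
    unfold find_best_partial_open_suffix_py_alt
    rw [pvLen_eq buf]
    rw [show (min pvMaxPartial (buf.toList.length : Int)).toNat = min 9 buf.toList.length from by
      rw [show pvMaxPartial = 9 from by decide]; omega]
    rw [pvScanB_eq]
    apply pvDF_congr
    intro l hl1 hl2
    have hln : l ≤ buf.toList.length := by omega
    rw [pvLen_eq buf]
    have hslen : (PySem.Str.slice buf (some ((buf.toList.length : Int) - (l : Int))) none).toList.length = l := by
      rw [pvSlicePos buf l hln]; exact hsfxlen l hl1 hln
    rw [pvContainsIff _ (by omega) (by omega)]
    rw [pvSlicePos buf l hln]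
  rw [hA, hB]
  exact max_eq_right (pvDF_mono _ (min 6 buf.toList.length) (min 9 buf.toList.length) (by omega))

-- ===== VERDICT (by name: the statement is the Claim_ definition above) =====
theorem find_best_partial_open_suffix_py_spec : Claim_equal_find_best_partial_open_suffix_py := by
  intro buf _
  exact find_best_partial_open_suffix_py_spec' buf
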